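-- pv_equiv track=rewrite | github.com/SEOKJUN-KO/CodingTest | Python/DP/연속 펄스 부분 수열의 합.py | solution
-- ===== SOURCE A (Python) =====
-- def solution(a):
--     ans = 2
--     S = a.copy()
--     E = a.copy()
--     for i in range(1, len(S)):
--         if S[i-1] < S[i]: S[i] = S[i-1]
--     for i in range(len(S)-1, 0, -1):
--         if E[i-1] > E[i]: E[i-1] = E[i]
--     for i in range(1, len(a)-1):
--         if S[i-1] > a[i] or E[i+1] > a[i]: ans += 1
--     return ans
-- ===== SOURCE B (Python) =====
-- def solution(a):
--     n = len(a)
--     if n <= 2: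
--         return 2
--     return 2 + sum(
--         1 for i in range(1, n - 1)
--         if all(x > a[i] for x in a[:i]) or all(x > a[i] for x in a[i + 1:])
--     )
-- ===== Notes on version B (the rewrite author's own statement) =====
-- stated objective: simpler
-- what changed: B removes A's dynamic-programming prefix/suffix-min arrays (built by in-place list mutation over three passes) and instead tests each interior index directly against all elements before it and all elements after it with a single comprehension, trading O(n) time for a much shorter O(n^2) brute force.
import Mathlib
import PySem

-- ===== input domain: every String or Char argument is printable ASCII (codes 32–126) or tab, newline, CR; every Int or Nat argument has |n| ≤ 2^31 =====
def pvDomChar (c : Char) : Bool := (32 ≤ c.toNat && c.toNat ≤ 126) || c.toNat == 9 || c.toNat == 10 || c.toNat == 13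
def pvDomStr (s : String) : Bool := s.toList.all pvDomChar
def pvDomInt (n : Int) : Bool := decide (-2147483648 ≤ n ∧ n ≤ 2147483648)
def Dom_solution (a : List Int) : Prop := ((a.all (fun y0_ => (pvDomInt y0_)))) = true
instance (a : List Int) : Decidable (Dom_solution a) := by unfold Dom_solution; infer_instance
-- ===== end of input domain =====

-- B drops A's prefix/suffix-min DP arrays entirely: each interior index is tested
-- directly against the elements before / after it (simpler and shorter, but O(n^2)).

-- ===== PORT A =====
-- body of 'for i in range(1, len(S)): if S[i-1] < S[i]: S[i] = S[i-1]'
def stepS (S : List Int) (i : Int) : List Int :=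
  if PySem.List.pyGetD S (i - 1) 0 < PySem.List.pyGetD S i 0 then
    PySem.List.pySetD S i (PySem.List.pyGetD S (i - 1) 0)
  else S

-- body of 'for i in range(len(S)-1, 0, -1): if E[i-1] > E[i]: E[i-1] = E[i]'
def stepE (E : List Int) (i : Int) : List Int :=
  if PySem.List.pyGetD E (i - 1) 0 > PySem.List.pyGetD E i 0 then
    PySem.List.pySetD E (i - 1) (PySem.List.pyGetD E i 0)
  else E

def solution (a : List Int) : Int :=
  let S := (PySem.List.pyRange 1 (a.length : Int) 1).foldl stepS a
  let E := (PySem.List.pyRange ((a.length : Int) - 1) 0 (-1)).foldl stepE a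
  (PySem.List.pyRange 1 ((a.length : Int) - 1) 1).foldl
    (fun ans i =>
      if PySem.List.pyGetD S (i - 1) 0 > PySem.List.pyGetD a i 0 ∨
         PySem.List.pyGetD E (i + 1) 0 > PySem.List.pyGetD a i 0
      then ans + 1 else ans) 2

-- ===== PORT B =====
-- 'sum(1 for i in range(1, n-1) if all(x > a[i] for x in a[:i]) or all(x > a[i] for x in a[i+1:]))'
def solution_alt (a : List Int) : Int :=
  let n : Int := a.length
  if n ≤ 2 then 2
  else
    2 + ((PySem.List.pyRange 1 (n - 1) 1).countP (fun i =>
      (PySem.List.slice a none (some i)).all (fun x => decide (x > PySem.List.pyGetD a i 0)) ||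
      (PySem.List.slice a (some (i + 1)) none).all (fun x => decide (x > PySem.List.pyGetD a i 0))) : Int)

-- ===== PRECONDITION & SPEC =====
def Spec_solution (a : List Int) (out : Int) : Prop := out = solution_alt a
instance (a : List Int) (out : Int) : Decidable (Spec_solution a out) := by unfold Spec_solution; infer_instance

-- ===== CLAIM (what is proved, stated in full; the proofs are below) =====
def Claim_equal_solution : Prop := ∀ (a : List Int), Dom_solution a → Spec_solution a (solution a)

-- ===== LEMMAS AND PROOFS =====

-- prefix minimum of a[0..j]
def pref (a : List Int) : Nat → Int
  | 0 => a.getD 0 0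
  | j + 1 => min (pref a j) (a.getD (j + 1) 0)

-- suffix minimum of a[j..]
def suff (a : List Int) (j : Nat) : Int :=
  if a.length ≤ j + 1 then a.getD j 0
  else min (a.getD j 0) (suff a (j + 1))
termination_by a.length - j

-- the predicate counted on interior indices (as a function of the index only)
def Pcond (a : List Int) (i : Int) : Bool :=
  decide (pref a (i.toNat - 1) > a.getD i.toNat 0 ∨ suff a (i.toNat + 1) > a.getD i.toNat 0)

-- invariant of A's first loop
lemma foldS_inv (a : List Int) (k : Nat) (hk : k ≤ a.length) :
    ((PySem.List.pyRange 1 (k : Int) 1).foldl stepS a).length = a.length ∧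
    ∀ j : Nat, j < a.length →
      ((PySem.List.pyRange 1 (k : Int) 1).foldl stepS a).getD j 0 =
        if j < k then pref a j else a.getD j 0 := by
  induction k with
  | zero =>
    rw [PySem.List.pyRange_one_eq_nil (by omega)]
    simp
  | succ k ih =>
    rcases Nat.eq_zero_or_pos k with hk0 | hk1
    · subst hk0
      rw [show (((0:Nat)+1 : Nat) : Int) = 1 by norm_num,
        PySem.List.pyRange_one_eq_nil (by omega)]
      simp only [List.foldl_nil]
      refine ⟨trivial, fun j hj => ?_⟩
      by_cases h : j < 1
      · have : j = 0 := by omega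
        subst this
        simp [pref]
      · simp [h]
    · obtain ⟨hlen, hget⟩ := ih (by omega)
      have hcast : ((k + 1 : Nat) : Int) = (k : Int) + 1 := by push_cast; ring
      rw [hcast, PySem.List.pyRange_one_succ_right (by exact_mod_cast hk1),
        List.foldl_append, List.foldl_cons, List.foldl_nil]
      set Sk := (PySem.List.pyRange 1 (k : Int) 1).foldl stepS a with hSk
      have hkm1 : (k : Int) - 1 = ((k - 1 : Nat) : Int) := by omega
      have hg1 : PySem.List.pyGetD Sk ((k : Int) - 1) 0 = pref a (k - 1) := by
        rw [hkm1, PySem.List.pyGetD_natCast, hget (k - 1) (by omega), if_pos (by omega)]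
      have hg2 : PySem.List.pyGetD Sk (k : Int) 0 = a.getD k 0 := by
        rw [PySem.List.pyGetD_natCast, hget k (by omega), if_neg (by omega)]
      have hpk : pref a k = min (pref a (k - 1)) (a.getD k 0) := by
        obtain ⟨k', rfl⟩ : ∃ k', k = k' + 1 := ⟨k - 1, by omega⟩
        simp [pref]
      unfold stepS
      rw [hg1, hg2]
      by_cases hlt : pref a (k - 1) < a.getD k 0
      · rw [if_pos hlt, PySem.List.pySetD_natCast]
        refine ⟨by simpa using hlen, fun j hj => ?_⟩
        have hjk : j < Sk.length := by omega
        rw [List.getD_eq_getElem _ _ (by simpa [hlen] using hj),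
          List.getElem_set]
        by_cases hj_eq : k = j
        · subst hj_eq
          rw [if_pos rfl, if_pos (by omega), hpk]
          omega
        · rw [if_neg hj_eq, ← List.getD_eq_getElem _ 0 (by simpa [hlen] using hj),
            hget j hj]
          have : (j < k + 1) ↔ (j < k) := by omega
          rw [if_congr this rfl rfl]
      · rw [if_neg hlt]
        refine ⟨hlen, fun j hj => ?_⟩
        rw [hget j hj]
        by_cases hj_eq : j = k
        · subst hj_eq
          rw [if_neg (by omega), if_pos (by omega), hpk]
          omega
        · have : (j < k + 1) ↔ (j < k) := by omega
          rw [if_congr this rfl rfl]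

-- a countdown range splits off its last (smallest) element
lemma pyRange_neg_one_snoc (hi lo : Int) (h : lo < hi) :
    PySem.List.pyRange hi lo (-1) = PySem.List.pyRange hi (lo + 1) (-1) ++ [lo + 1] := by
  rw [PySem.List.pyRange_neg_one_eq_reverse, PySem.List.pyRange_neg_one_eq_reverse,
    PySem.List.pyRange_one_cons (by omega : lo + 1 < hi + 1)]
  simp

-- invariant of A's second loop
lemma foldE_inv (a : List Int) (k : Nat) :
    ((PySem.List.pyRange ((a.length : Int) - 1) (k : Int) (-1)).foldl stepE a).length = a.length ∧
    ∀ j : Nat, j < a.length →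
      ((PySem.List.pyRange ((a.length : Int) - 1) (k : Int) (-1)).foldl stepE a).getD j 0 =
        if k ≤ j then suff a j else a.getD j 0 := by
  by_cases hbig : (a.length : Int) - 1 ≤ (k : Int)
  · rw [PySem.List.pyRange_neg_one_eq_nil hbig]
    simp only [List.foldl_nil]
    refine ⟨trivial, fun j hj => ?_⟩
    by_cases h : k ≤ j
    · rw [if_pos h]
      have : a.length ≤ j + 1 := by omega
      rw [suff, if_pos this]
    · rw [if_neg h]
  · have ih := foldE_inv a (k + 1)
    obtain ⟨hlen, hget⟩ := ih
    have hsplit : PySem.List.pyRange ((a.length : Int) - 1) (k : Int) (-1) =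
        PySem.List.pyRange ((a.length : Int) - 1) ((k : Int) + 1) (-1) ++ [(k : Int) + 1] := by
      exact pyRange_neg_one_snoc _ _ (by omega)
    have hcast : ((k + 1 : Nat) : Int) = (k : Int) + 1 := by push_cast; ring
    rw [hsplit, ← hcast, List.foldl_append, List.foldl_cons, List.foldl_nil]
    set Ek := (PySem.List.pyRange ((a.length : Int) - 1) ((k + 1 : Nat) : Int) (-1)).foldl stepE a
      with hEk
    have hg1 : PySem.List.pyGetD Ek (((k + 1 : Nat) : Int) - 1) 0 = a.getD k 0 := by
      rw [show (((k + 1 : Nat) : Int) - 1) = ((k : Nat) : Int) by omega,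
        PySem.List.pyGetD_natCast, hget k (by omega), if_neg (by omega)]
    have hg2 : PySem.List.pyGetD Ek ((k + 1 : Nat) : Int) 0 = suff a (k + 1) := by
      rw [PySem.List.pyGetD_natCast, hget (k + 1) (by omega), if_pos (by omega)]
    have hsk : suff a k = min (a.getD k 0) (suff a (k + 1)) := by
      rw [suff, if_neg (by omega)]
    unfold stepE
    rw [hg1, hg2]
    by_cases hlt : a.getD k 0 > suff a (k + 1)
    · rw [if_pos hlt,
        show (((k + 1 : Nat) : Int) - 1) = ((k : Nat) : Int) by omega,
        PySem.List.pySetD_natCast]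
      refine ⟨by simpa using hlen, fun j hj => ?_⟩
      rw [List.getD_eq_getElem _ _ (by simpa [hlen] using hj), List.getElem_set]
      by_cases hj_eq : k = j
      · subst hj_eq
        rw [if_pos rfl, if_pos (by omega), hsk]
        omega
      · rw [if_neg hj_eq, ← List.getD_eq_getElem _ 0 (by simpa [hlen] using hj),
          hget j hj]
        have : (k + 1 ≤ j) ↔ (k ≤ j) := by omega
        rw [if_congr this rfl rfl]
    · rw [if_neg hlt]
      refine ⟨hlen, fun j hj => ?_⟩
      rw [hget j hj]
      by_cases hj_eq : j = k
      · subst hj_eq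
        rw [if_neg (by omega), if_pos (by omega), hsk]
        omega
      · have : (k + 1 ≤ j) ↔ (k ≤ j) := by omega
        rw [if_congr this rfl rfl]
termination_by a.length - k

lemma solution_eq_count (a : List Int) :
    solution a =
      2 + ((PySem.List.pyRange 1 ((a.length : Int) - 1) 1).countP
              (Pcond a) : Int) := by
  unfold solution
  obtain ⟨hSlen, hS⟩ := foldS_inv a a.length le_rfl
  obtain ⟨hElen, hE⟩ := foldE_inv a 0
  simp only [Nat.cast_zero] at hE hElen
  set S := (PySem.List.pyRange 1 (a.length : Int) 1).foldl stepS a with hSdef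
  set E := (PySem.List.pyRange ((a.length : Int) - 1) 0 (-1)).foldl stepE a with hEdef
  rw [PySem.List.foldl_ite_add_one]
  congr 1
  refine congrArg Nat.cast ?_
  apply List.countP_congr
  intro i hi
  obtain ⟨hi1, hi2⟩ := (PySem.List.mem_pyRange_one).mp hi
  have hn3 : 3 ≤ a.length := by omega
  have hit : i = ((i.toNat : Nat) : Int) := by omega
  have e1 : PySem.List.pyGetD S (i - 1) 0 = pref a (i.toNat - 1) := by
    rw [show i - 1 = ((i.toNat - 1 : Nat) : Int) by omega, PySem.List.pyGetD_natCast,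
      hS (i.toNat - 1) (by omega), if_pos (by omega)]
  have e2 : PySem.List.pyGetD a i 0 = a.getD i.toNat 0 := by
    rw [hit, PySem.List.pyGetD_natCast, Int.toNat_natCast]
  have e3 : PySem.List.pyGetD E (i + 1) 0 = suff a (i.toNat + 1) := by
    rw [show i + 1 = ((i.toNat + 1 : Nat) : Int) by omega, PySem.List.pyGetD_natCast,
      hE (i.toNat + 1) (by omega), if_pos (by omega)]
  unfold Pcond
  simp only [decide_eq_true_eq]
  rw [e1, e2, e3]

-- B's direct test against the elements before i is the prefix-min comparison
lemma take_all_gt (a : List Int) (v : Int) (k : Nat) (h1 : 1 ≤ k) (hk : k ≤ a.length) :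
    ((a.take k).all (fun x => decide (x > v)) = true) ↔ pref a (k - 1) > v := by
  induction k with
  | zero => omega
  | succ k ih =>
    rcases Nat.eq_zero_or_pos k with hk0 | hk1
    · subst hk0
      have hx : a.take 1 = [a.getD 0 0] := by
        cases a with
        | nil => simp at hk
        | cons x xs => simp [List.getD]
      rw [hx]
      simp [pref]
    · have hklen : k < a.length := by omega
      rw [List.take_add_one, List.all_append]
      have hget : a[k]? = some (a.getD k 0) := by
        rw [List.getElem?_eq_getElem hklen, List.getD_eq_getElem _ _ hklen]
      rw [hget]
      have hpk : pref a k = min (pref a (k - 1)) (a.getD k 0) := by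
        obtain ⟨k', rfl⟩ : ∃ k', k = k' + 1 := ⟨k - 1, by omega⟩
        simp [pref]
      simp only [Nat.add_sub_cancel, hpk, Bool.and_eq_true, ih hk1 (by omega)]
      simp only [Option.toList_some, List.all_cons, List.all_nil, Bool.and_true,
        decide_eq_true_eq]
      omega

-- B's direct test against the elements after i is the suffix-min comparison
lemma drop_all_gt (a : List Int) (v : Int) (k : Nat) (hk : k < a.length) :
    ((a.drop k).all (fun x => decide (x > v)) = true) ↔ suff a k > v := by
  by_cases hlast : a.length ≤ k + 1
  · have hdrop : a.drop k = [a.getD k 0] := by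
      have hlen : (a.drop k).length = 1 := by simp; omega
      have h0 : (a.drop k).getD 0 0 = a.getD k 0 := by
        rw [List.getD_eq_getElem _ _ (by omega), List.getElem_drop,
          List.getD_eq_getElem _ _ (by omega)]
        simp
      cases hD : a.drop k with
      | nil => rw [hD] at hlen; simp at hlen
      | cons x xs =>
        rw [hD] at hlen h0
        simp at hlen
        simp [List.getD] at h0
        rw [hlen, h0, List.getD_eq_getElem _ _ (by omega)]
        rw [List.getElem?_eq_getElem hk]
        simp
    rw [hdrop, suff, if_pos hlast]
    simp
  · have ih := drop_all_gt a v (k + 1) (by omega)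
    have hdrop : a.drop k = a.getD k 0 :: a.drop (k + 1) := by
      rw [List.getD_eq_getElem _ _ hk, List.drop_eq_getElem_cons hk]
    rw [hdrop, List.all_cons, suff, if_neg hlast]
    simp only [Bool.and_eq_true, decide_eq_true_eq, ih]
    omega
termination_by a.length - k

lemma solution_alt_eq_count (a : List Int) :
    solution_alt a =
      2 + ((PySem.List.pyRange 1 ((a.length : Int) - 1) 1).countP
              (Pcond a) : Int) := by
  unfold solution_alt
  by_cases h2 : (a.length : Int) ≤ 2
  · rw [if_pos h2, PySem.List.pyRange_one_eq_nil (by omega)]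
    simp
  · rw [if_neg h2]
    congr 2
    apply List.countP_congr
    intro i hi
    obtain ⟨hi1, hi2⟩ := (PySem.List.mem_pyRange_one).mp hi
    have hn3 : 3 ≤ a.length := by omega
    have e2 : PySem.List.pyGetD a i 0 = a.getD i.toNat 0 := by
      rw [show i = ((i.toNat : Nat) : Int) by omega, PySem.List.pyGetD_natCast,
        Int.toNat_natCast]
    have hs1 : PySem.List.slice a none (some i) = a.take i.toNat :=
      PySem.List.slice_to a (by omega)
    have hs2 : PySem.List.slice a (some (i + 1)) none = a.drop (i + 1).toNat :=
      PySem.List.slice_from a (by omega)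
    rw [hs1, hs2, e2]
    have htoNat : (i + 1).toNat = i.toNat + 1 := by omega
    rw [htoNat]
    unfold Pcond
    simp only [Bool.or_eq_true, decide_eq_true_eq]
    rw [take_all_gt a _ i.toNat (by omega) (by omega),
      drop_all_gt a _ (i.toNat + 1) (by omega)]

-- ===== VERDICT (by name: the statement is the Claim_ definition above) =====
theorem solution_spec : Claim_equal_solution := by
  intro a _
  unfold Spec_solution
  rw [solution_eq_count, solution_alt_eq_count]
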